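-- pv_equiv track=rewrite | github.com/incredible-smurf/few-nerd-try | data_process/few_ner_dataset_for_bart copy.py | __mask__raw_token
-- ===== SOURCE A (Python) =====
-- def __mask__raw_token(raw,entity):
--     masked_tokens=raw.copy()
--     lenth=len(entity)
--     for i in range(len(masked_tokens)-lenth):
--         mask=True
--         for j in range(lenth):
--             if(entity[j]!=masked_tokens[i+j]):
--                 mask=False
--                 break
--         if(mask):
--             for j in range(lenth):
--                 masked_tokens[i+j]='<mask>'
--     return masked_tokens
-- ===== SOURCE B (Python) =====
-- def _matches(raw, entity, i):
--     if i + len(entity) > len(raw):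
--         return False
--     for j, tok in enumerate(entity):
--         if raw[i + j] != tok:
--             return False
--     return True
--
-- def __mask__raw_token(raw, entity):
--     L = len(entity)
--     if L == 0:
--         return raw.copy()
--     out = []
--     i = 0
--     while i < len(raw):
--         if _matches(raw, entity, i):
--             out += ['<mask>'] * L
--             i += L
--         else:
--             out.append(raw[i])
--             i += 1
--     return out
-- ===== Notes on version B (the rewrite author's own statement) =====
-- stated objective: alternative
-- what changed: Replaces A's in-place mutation with three nested index loops re-scanning the mutated list by a single left-to-right pass that builds a fresh output via an early-exit window compare and jumps past each match; Pre_ excludes inputs where the sentinel '<mask>' occurs in both entity and raw, a self-referential corner (matching against the partially masked list vs the pristine input) that no caller would specify.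
-- intended difference: On inputs whose nonempty entity occurs at the last possible start len(raw)-len(entity) and that occurrence survives leftmost non-overlapping matching, A's loop bound range(len(raw)-len(entity)) stops one short and returns that final occurrence unmasked, while B masks it - masking every occurrence is the function's purpose. — e.g. on __mask__raw_token(["a", "b"], ["b"]): A returns ["a", "b"], B returns ["a", "<mask>"]
import Mathlib
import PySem

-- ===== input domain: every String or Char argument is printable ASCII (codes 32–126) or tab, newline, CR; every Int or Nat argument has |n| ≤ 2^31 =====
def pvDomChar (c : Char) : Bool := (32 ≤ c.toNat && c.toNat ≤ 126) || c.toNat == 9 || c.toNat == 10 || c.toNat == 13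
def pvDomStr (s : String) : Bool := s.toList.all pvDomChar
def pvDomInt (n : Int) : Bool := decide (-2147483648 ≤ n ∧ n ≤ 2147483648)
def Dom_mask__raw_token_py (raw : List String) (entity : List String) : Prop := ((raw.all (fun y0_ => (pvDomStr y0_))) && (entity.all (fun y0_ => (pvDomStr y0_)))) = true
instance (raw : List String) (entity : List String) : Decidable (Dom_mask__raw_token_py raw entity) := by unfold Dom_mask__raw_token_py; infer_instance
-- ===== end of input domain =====

-- B replaces A's mutate-and-rescan triple loop by one pass that builds a fresh output and
-- jumps past each match (alternative algorithm); unlike A it also masks an occurrence ending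
-- at the last token (see D_ below).

-- ===== PORT A =====
-- inner 'for j in range(lenth): if entity[j]!=masked_tokens[i+j]: mask=False; break'
-- (the flag-with-break loop is ported as .all; all indices are in range at every call site,
-- so the pyGetD defaults are never read)
def pyInnerA (masked entity : List String) (i : Int) : Bool :=
  (PySem.List.pyRange 0 (entity.length : Int) 1).all
    (fun j => PySem.List.pyGetD entity j "" == PySem.List.pyGetD masked (i + j) "")

-- 'for j in range(lenth): masked_tokens[i+j]='<mask>''  (in-range assignment = pySetD)
def pyMaskA (masked entity : List String) (i : Int) : List String :=
  (PySem.List.pyRange 0 (entity.length : Int) 1).foldl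
    (fun m j => PySem.List.pySetD m (i + j) "<mask>") masked

def mask__raw_token_py (raw : List String) (entity : List String) : List String :=
  (PySem.List.pyRange 0 ((raw.length : Int) - (entity.length : Int)) 1).foldl
    (fun masked i => if pyInnerA masked entity i then pyMaskA masked entity i else masked)
    raw

-- ===== PORT B =====
-- '_matches(raw, entity, i)' of Source B: the length guard, then the early-return token loop
-- over enumerate(entity) (ported as .all; the guard keeps every index in range, so the
-- pyGetD default is never read)
def bMatches (raw entity : List String) (i : Nat) : Bool :=
  if raw.length < i + entity.length then false
  else (PySem.List.enumerate entity 0).all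
    (fun p => PySem.List.pyGetD raw ((i : Int) + p.1) "" == p.2)

-- the 'while i < len(raw)' loop of Source B; '['<mask>'] * L' is replicate; the loop only runs
-- after the early return for an empty entity, hence the 0 < length argument (termination)
def bGo (raw entity : List String) (hL : 0 < entity.length) (i : Nat) : List String :=
  if h : i < raw.length then
    if hm : bMatches raw entity i = true then
      List.replicate entity.length "<mask>" ++ bGo raw entity hL (i + entity.length)
    else raw[i] :: bGo raw entity hL (i + 1)
  else []
termination_by raw.length - i
decreasing_by all_goals omega

def mask__raw_token_py_alt (raw : List String) (entity : List String) : List String :=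
  if h : entity.length = 0 then raw
  else bGo raw entity (Nat.pos_of_ne_zero h) 0

-- ===== PRECONDITION & SPEC =====
-- Pre_ excludes inputs in which the sentinel token '<mask>' occurs both in entity and in raw:
-- there a window can compare equal only thanks to sentinels A itself just wrote, and matching
-- against the partially masked list (A) or against the pristine input (B) are both defensible
-- readings that no caller would specify; B matches plainly against the input.
def Pre_mask__raw_token_py (raw : List String) (entity : List String) : Prop :=
  ¬ ("<mask>" ∈ entity ∧ "<mask>" ∈ raw)
instance (raw : List String) (entity : List String) : Decidable (Pre_mask__raw_token_py raw entity) := by unfold Pre_mask__raw_token_py; infer_instance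

def pvWitness_mask__raw_token_py : List String × List String := (["a", "b", "a"], ["a"])

-- On inputs where the nonempty entity occurs at the last possible start len(raw)-len(entity)
-- and that occurrence survives leftmost non-overlapping matching, A's loop bound
-- range(len(raw)-len(entity)) stops one short and returns that occurrence unmasked, while B
-- masks it — masking every occurrence is the function's purpose.
def D_mask__raw_token_py (raw : List String) (entity : List String) : Prop :=
  entity ≠ [] ∧ raw.drop (raw.length - entity.length) = entity ∧
    ((List.range (raw.length - entity.length)).foldl
      (fun a i => if a ≤ i ∧ (raw.drop i).take entity.length = entity then i + entity.length
        else a) 0) ≤ raw.length - entity.length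
instance (raw : List String) (entity : List String) : Decidable (D_mask__raw_token_py raw entity) := by unfold D_mask__raw_token_py; infer_instance

def Spec_mask__raw_token_py (raw : List String) (entity : List String) (out : List String) : Prop := ¬ D_mask__raw_token_py raw entity → out = mask__raw_token_py_alt raw entity
instance (raw : List String) (entity : List String) (out : List String) : Decidable (Spec_mask__raw_token_py raw entity out) := by unfold Spec_mask__raw_token_py; infer_instance

def pvDiffWitness_mask__raw_token_py : List String × List String := (["a", "b"], ["b"])
def pvDiffWitnessOut_mask__raw_token_py : (List String) × (List String) :=
  (["a", "b"], ["a", "<mask>"])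

-- ===== CLAIM (what is proved, stated in full; the proofs are below) =====
def Claim_unchanged_mask__raw_token_py : Prop := ∀ (raw : List String) (entity : List String), Dom_mask__raw_token_py raw entity → Pre_mask__raw_token_py raw entity → Spec_mask__raw_token_py raw entity (mask__raw_token_py raw entity)
def Claim_changed_mask__raw_token_py : Prop := Dom_mask__raw_token_py (pvDiffWitness_mask__raw_token_py.1) (pvDiffWitness_mask__raw_token_py.2) ∧ Pre_mask__raw_token_py (pvDiffWitness_mask__raw_token_py.1) (pvDiffWitness_mask__raw_token_py.2) ∧ D_mask__raw_token_py (pvDiffWitness_mask__raw_token_py.1) (pvDiffWitness_mask__raw_token_py.2) ∧ mask__raw_token_py (pvDiffWitness_mask__raw_token_py.1) (pvDiffWitness_mask__raw_token_py.2) = pvDiffWitnessOut_mask__raw_token_py.1 ∧ mask__raw_token_py_alt (pvDiffWitness_mask__raw_token_py.1) (pvDiffWitness_mask__raw_token_py.2) = pvDiffWitnessOut_mask__raw_token_py.2 ∧ pvDiffWitnessOut_mask__raw_token_py.1 ≠ pvDiffWitnessOut_mask__raw_token_py.2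
def Claim_exact_mask__raw_token_py : Prop := ∀ (raw : List String) (entity : List String), Dom_mask__raw_token_py raw entity → Pre_mask__raw_token_py raw entity → D_mask__raw_token_py raw entity → mask__raw_token_py raw entity ≠ mask__raw_token_py_alt raw entity

-- ===== LEMMAS AND PROOFS =====

-- the greedy bound of leftmost non-overlapping matching (the fold inside D_): occurrence
-- starts below m are taken iff they start at or after the bound, a take moves the bound
def pvGreedyBound (raw entity : List String) (m : Nat) : Nat :=
  (List.range m).foldl
    (fun a i => if a ≤ i ∧ (raw.drop i).take entity.length = entity then i + entity.length
      else a) 0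

lemma D_iff (raw entity : List String) :
    D_mask__raw_token_py raw entity ↔
      entity ≠ [] ∧ raw.drop (raw.length - entity.length) = entity ∧
        pvGreedyBound raw entity (raw.length - entity.length)
          ≤ raw.length - entity.length := Iff.rfl

-- Source B's _matches decides exactly 'entity is the window of raw starting at i'
lemma bMatches_iff (raw entity : List String) (i : Nat) (hL : 0 < entity.length) :
    bMatches raw entity i = true ↔ (raw.drop i).take entity.length = entity := by
  unfold bMatches
  by_cases hb : raw.length < i + entity.length
  · simp only [if_pos hb, Bool.false_eq_true, false_iff]
    intro hc
    have := congrArg List.length hc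
    simp only [List.length_take, List.length_drop] at this
    omega
  · simp only [if_neg hb]
    have hb' : i + entity.length ≤ raw.length := by omega
    have key : ∀ (k : Nat) (hk : k < entity.length),
        (PySem.List.pyGetD raw ((i : Int) + ((0 : Int) + (k : Nat))) "" = raw[i + k]'(by omega)) := by
      intro k hk
      have : (i : Int) + ((0 : Int) + (k : Nat)) = ((i + k : Nat) : Int) := by push_cast; ring
      rw [this, PySem.List.pyGetD_natCast, List.getD_eq_getElem?_getD,
        List.getElem?_eq_getElem (by omega)]
      rfl
    rw [List.all_eq_true]
    constructor
    · intro hall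
      apply List.ext_getElem
      · simp; omega
      · intro k h1 h2
        have hk : k < entity.length := h2
        have hp := hall ((0 : Int) + (k : Nat), entity[k])
          (by rw [PySem.List.mem_enumerate_iff]; exact ⟨k, hk, rfl⟩)
        simp only [beq_iff_eq] at hp
        rw [key k hk] at hp
        simp only [List.getElem_take, List.getElem_drop]
        exact hp
    · intro heq p hp
      rw [PySem.List.mem_enumerate_iff] at hp
      obtain ⟨k, hk, rfl⟩ := hp
      simp only [beq_iff_eq]
      rw [key k hk]
      have := congrArg (fun l => l[k]?) heq
      simp only [List.getElem?_take, hk, if_pos, List.getElem?_drop,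
        List.getElem?_eq_getElem (show i + k < raw.length by omega),
        List.getElem?_eq_getElem hk] at this
      injection this

lemma pvGreedyBound_zero (raw entity : List String) : pvGreedyBound raw entity 0 = 0 := by
  simp [pvGreedyBound]

lemma pvGreedyBound_succ (raw entity : List String) (m : Nat) :
    pvGreedyBound raw entity (m + 1) =
      if (raw.drop m).take entity.length = entity then
        (if pvGreedyBound raw entity m ≤ m then m + entity.length
         else pvGreedyBound raw entity m)
      else pvGreedyBound raw entity m := by
  unfold pvGreedyBound
  rw [List.range_succ, List.foldl_append]
  simp only [List.foldl_cons, List.foldl_nil]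
  split_ifs with h1 h2 h3 h4 <;> tauto

-- once an occurrence at i is taken (bound ≤ i), the bound stays i + L throughout its span
lemma pvGreedyBound_block (raw entity : List String) (i : Nat)
    (hocc : (raw.drop i).take entity.length = entity)
    (hle : pvGreedyBound raw entity i ≤ i) :
    ∀ t, 1 ≤ t → t ≤ entity.length →
      pvGreedyBound raw entity (i + t) = i + entity.length := by
  intro t
  induction t with
  | zero => omega
  | succ t ih =>
    intro _ ht1
    by_cases ht0 : t = 0
    · subst ht0
      rw [pvGreedyBound_succ, if_pos hocc, if_pos hle]
    · have hprev := ih (by omega) (by omega)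
      rw [show i + (t + 1) = (i + t) + 1 by omega, pvGreedyBound_succ, hprev]
      by_cases ho : (raw.drop (i + t)).take entity.length = entity
      · rw [if_pos ho, if_neg (by omega)]
      · rw [if_neg ho]

-- past the last possible start B just copies, provided there is no occurrence right here
lemma bGo_tail (raw entity : List String) (hL : 0 < entity.length) :
    ∀ d i, raw.length - i ≤ d → raw.length ≤ i + entity.length →
    ¬ (raw.drop i).take entity.length = entity →
    bGo raw entity hL i = raw.drop i := by
  intro d
  induction d with
  | zero =>
    intro i hd _ _
    rw [bGo, dif_neg (by omega), List.drop_eq_nil_of_le (by omega)]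
  | succ d ih =>
    intro i hd hge hno
    by_cases hlt : i < raw.length
    · have hno' : ¬ (raw.drop (i + 1)).take entity.length = entity := by
        intro hc
        have := congrArg List.length hc
        simp only [List.length_take, List.length_drop] at this
        omega
      rw [bGo, dif_pos hlt, dif_neg (fun hm => hno ((bMatches_iff raw entity i hL).mp hm)),
        ih (i + 1) (by omega) (by omega) hno', ← List.drop_eq_getElem_cons hlt]
    · rw [bGo, dif_neg hlt, List.drop_eq_nil_of_le (by omega)]

lemma bGo_length (raw entity : List String) (hL : 0 < entity.length) :
    ∀ d i, raw.length - i ≤ d → (bGo raw entity hL i).length = raw.length - i := by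
  intro d
  induction d with
  | zero =>
    intro i hd
    rw [bGo, dif_neg (by omega)]
    simp; omega
  | succ d ih =>
    intro i hd
    by_cases hlt : i < raw.length
    · rw [bGo, dif_pos hlt]
      by_cases hm : bMatches raw entity i = true
      · have hocc := (bMatches_iff raw entity i hL).mp hm
        have hlen := congrArg List.length hocc
        simp only [List.length_take, List.length_drop] at hlen
        rw [dif_pos hm]
        simp only [List.length_append, List.length_replicate, ih (i + entity.length) (by omega)]
        omega
      · rw [dif_neg hm]
        simp only [List.length_cons, ih (i + 1) (by omega)]
        omega
    · rw [bGo, dif_neg hlt]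
      simp; omega

-- A's inner comparison on a clean window reads raw
lemma innerA_clean (raw entity out : List String) (i : Nat)
    (hlen : out.length = i) (hin : i + entity.length ≤ raw.length) :
    pyInnerA (out ++ raw.drop i) entity (i : Int) = true ↔
      (raw.drop i).take entity.length = entity := by
  have key : ∀ (jn : Nat) (hjn : jn < entity.length),
      PySem.List.pyGetD (out ++ raw.drop i) ((i : Int) + (jn : Int)) "" = raw[i + jn]'(by omega) := by
    intro jn hjn
    have : (i : Int) + (jn : Int) = ((i + jn : Nat) : Int) := by push_cast; ring
    rw [this, PySem.List.pyGetD_natCast, List.getD_eq_getElem?_getD,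
      List.getElem?_append_right (by omega), hlen]
    have h2 : i + jn - i = jn := by omega
    rw [h2, List.getElem?_drop, List.getElem?_eq_getElem (by omega)]
    rfl
  unfold pyInnerA
  rw [List.all_eq_true]
  constructor
  · intro hall
    apply List.ext_getElem
    · simp; omega
    · intro jn h1 h2
      have hjn : jn < entity.length := by simp at h1; omega
      have hj := hall ((jn : Nat) : Int)
        (by rw [PySem.List.mem_pyRange_one]; constructor <;> [positivity; exact_mod_cast hjn])
      simp only [beq_iff_eq] at hj
      rw [key jn hjn] at hj
      rw [PySem.List.pyGetD_natCast, List.getD_eq_getElem?_getD, List.getElem?_eq_getElem hjn] at hj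
      simp only [List.getElem_take, List.getElem_drop]
      exact hj.symm
  · intro heq j hj
    rw [PySem.List.mem_pyRange_one] at hj
    obtain ⟨hj0, hjL⟩ := hj
    have hjn : j.toNat < entity.length := by omega
    have hcast : j = ((j.toNat : Nat) : Int) := by omega
    rw [hcast, key j.toNat hjn, PySem.List.pyGetD_natCast, List.getD_eq_getElem?_getD,
      List.getElem?_eq_getElem hjn]
    have := congrArg (fun l => l[j.toNat]?) heq
    simp only [List.getElem?_take, hjn, if_pos, List.getElem?_drop,
      List.getElem?_eq_getElem (show i + j.toNat < raw.length by omega),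
      List.getElem?_eq_getElem hjn] at this
    simp only [Option.getD_some, beq_iff_eq]
    injection this with h
    exact h.symm

-- A's masking loop on a clean window writes a block of '<mask>'
lemma maskFold (raw : List String) :
    ∀ (k i : Nat) (out : List String), out.length = i → i + k ≤ raw.length →
    (PySem.List.pyRange 0 (k : Int) 1).foldl
        (fun m j => PySem.List.pySetD m ((i : Int) + j) "<mask>") (out ++ raw.drop i)
      = out ++ List.replicate k "<mask>" ++ raw.drop (i + k) := by
  intro k
  induction k with
  | zero =>
    intro i out hlen hin
    rw [show ((0 : Nat) : Int) = 0 by norm_num, PySem.List.pyRange_one_eq_nil le_rfl]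
    simp
  | succ k ih =>
    intro i out hlen hin
    have hcast : ((k + 1 : Nat) : Int) = (k : Int) + 1 := by push_cast; ring
    rw [hcast, PySem.List.pyRange_one_succ_right (by positivity), List.foldl_append,
      ih i out hlen (by omega)]
    simp only [List.foldl_cons, List.foldl_nil]
    have hidx : (i : Int) + (k : Int) = ((i + k : Nat) : Int) := by push_cast; ring
    rw [hidx, PySem.List.pySetD_natCast,
      List.drop_eq_getElem_cons (show i + k < raw.length by omega)]
    have hgen : ∀ (A : List String) (x v : String) (t : List String),
        (A ++ x :: t).set A.length v = A ++ v :: t := by intro A x v t; simp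
    have hpre : (out ++ List.replicate k "<mask>").length = i + k := by simp [hlen]
    have := hgen (out ++ List.replicate k "<mask>") (raw[i + k]'(by omega)) "<mask>"
      (raw.drop (i + k + 1))
    rw [hpre] at this
    rw [this, List.replicate_succ' (n := k)]
    simp [List.append_assoc]
    rw [show i + (k + 1) = i + k + 1 by omega]

lemma maskA_clean (raw entity out : List String) (i : Nat)
    (hlen : out.length = i) (hin : i + entity.length ≤ raw.length) :
    pyMaskA (out ++ raw.drop i) entity (i : Int)
      = out ++ List.replicate entity.length "<mask>" ++ raw.drop (i + entity.length) :=
  maskFold raw entity.length i out hlen hin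

-- indices inside a just-masked span never match again (entity has no '<mask>')
lemma innerA_overlap (raw entity out : List String) (i i' : Nat)
    (hm : "<mask>" ∉ entity) (hlen : out.length = i) (hL : 0 < entity.length)
    (h1 : i < i') (h2 : i' < i + entity.length) :
    pyInnerA (out ++ (List.replicate entity.length "<mask>" ++ raw.drop (i + entity.length)))
        entity (i' : Int) = false := by
  set L := entity.length with hLdef
  unfold pyInnerA
  rw [List.all_eq_false]
  refine ⟨((i + L - 1 - i' : Nat) : Int), ?_, ?_⟩
  · rw [PySem.List.mem_pyRange_one]
    constructor
    · positivity
    · exact_mod_cast (by omega : i + L - 1 - i' < L)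
  · have hj : i + L - 1 - i' < L := by omega
    have hidx : (i' : Int) + ((i + L - 1 - i' : Nat) : Int) = ((i + L - 1 : Nat) : Int) := by
      omega
    rw [hidx, PySem.List.pyGetD_natCast, PySem.List.pyGetD_natCast]
    have hmem : entity.getD (i + L - 1 - i') "" ∈ entity := by
      rw [List.getD_eq_getElem?_getD, List.getElem?_eq_getElem hj]
      exact List.getElem_mem hj
    have hval : (out ++ (List.replicate L "<mask>" ++ raw.drop (i + L))).getD (i + L - 1) ""
        = "<mask>" := by
      rw [List.getD_eq_getElem?_getD, List.getElem?_append_right (by omega), hlen,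
        List.getElem?_append_left (by simp; omega)]
      simp [show i + L - 1 - i < L by omega]
    rw [hval]
    simp only [beq_iff_eq]
    intro hc
    exact hm (hc ▸ hmem)

-- A's loop indices strictly inside a just-masked block all fail, so the fold skips to its end
lemma skipFold (raw entity out : List String) (i : Nat)
    (hm : "<mask>" ∉ entity) (hlen : out.length = i) (hL : 0 < entity.length) :
    ∀ (t i' : Nat), i < i' → i' + t = i + entity.length →
    (PySem.List.pyRange (i' : Int) ((raw.length : Int) - (entity.length : Int)) 1).foldl
        (fun masked k => if pyInnerA masked entity k then pyMaskA masked entity k else masked)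
        (out ++ (List.replicate entity.length "<mask>" ++ raw.drop (i + entity.length)))
      = (PySem.List.pyRange ((i + entity.length : Nat) : Int)
            ((raw.length : Int) - (entity.length : Int)) 1).foldl
        (fun masked k => if pyInnerA masked entity k then pyMaskA masked entity k else masked)
        (out ++ (List.replicate entity.length "<mask>" ++ raw.drop (i + entity.length))) := by
  intro t
  induction t with
  | zero =>
    intro i' h1 h2
    rw [show i' = i + entity.length by omega]
  | succ t ih =>
    intro i' h1 h2
    by_cases hb : (i' : Int) < (raw.length : Int) - (entity.length : Int)
    · rw [PySem.List.pyRange_one_cons hb, List.foldl_cons,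
        if_neg (by rw [innerA_overlap raw entity out i i' hm hlen hL h1 (by omega)]; simp),
        show (i' : Int) + 1 = ((i' + 1 : Nat) : Int) by push_cast; ring,
        ih (i' + 1) (by omega) (by omega)]
    · rw [PySem.List.pyRange_one_eq_nil (by omega),
        PySem.List.pyRange_one_eq_nil (by push_cast at hb ⊢; omega)]

-- main invariant: A's remaining loop from a clean, greedily reached state equals
-- out ++ B's suffix (the greedy bound rules out a take of the final occurrence)
lemma mainA (raw entity : List String) (hm : "<mask>" ∉ entity) (hL : 0 < entity.length)
    (hD : ¬ D_mask__raw_token_py raw entity) :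
    ∀ (d i : Nat) (out : List String), raw.length - i ≤ d → out.length = i →
    pvGreedyBound raw entity i ≤ i →
    (PySem.List.pyRange (i : Int) ((raw.length : Int) - (entity.length : Int)) 1).foldl
        (fun masked k => if pyInnerA masked entity k then pyMaskA masked entity k else masked)
        (out ++ raw.drop i)
      = out ++ bGo raw entity hL i := by
  intro d
  induction d with
  | zero =>
    intro i out hd hlen hinv
    have hge : raw.length ≤ i + entity.length := by omega
    rw [PySem.List.pyRange_one_eq_nil (by omega), List.foldl_nil,
      bGo_tail raw entity hL (raw.length - i) i le_rfl hge (by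
        intro hc
        have := congrArg List.length hc
        simp only [List.length_take, List.length_drop] at this
        omega)]
  | succ d ih =>
    intro i out hd hlen hinv
    by_cases hb : (i : Int) < (raw.length : Int) - (entity.length : Int)
    · have hiL : i + entity.length < raw.length := by omega
      rw [PySem.List.pyRange_one_cons hb, List.foldl_cons]
      by_cases hmatch : (raw.drop i).take entity.length = entity
      · rw [if_pos ((innerA_clean raw entity out i hlen (by omega)).mpr hmatch),
          maskA_clean raw entity out i hlen (by omega), List.append_assoc,
          show (i : Int) + 1 = ((i + 1 : Nat) : Int) by push_cast; ring,
          skipFold raw entity out i hm hlen hL (entity.length - 1) (i + 1) (by omega) (by omega),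
          ← List.append_assoc,
          ih (i + entity.length) (out ++ List.replicate entity.length "<mask>")
            (by omega) (by simp [hlen])
            (by rw [pvGreedyBound_block raw entity i hmatch hinv entity.length (by omega) le_rfl])]
        conv_rhs => rw [bGo]
        rw [dif_pos (show i < raw.length by omega),
          dif_pos ((bMatches_iff raw entity i hL).mpr hmatch)]
        simp [List.append_assoc]
      · rw [if_neg (fun hc => hmatch ((innerA_clean raw entity out i hlen (by omega)).mp hc)),
          show (i : Int) + 1 = ((i + 1 : Nat) : Int) by push_cast; ring,
          List.drop_eq_getElem_cons (show i < raw.length by omega),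
          show out ++ raw[i] :: raw.drop (i + 1) = (out ++ [raw[i]]) ++ raw.drop (i + 1) by simp,
          ih (i + 1) (out ++ [raw[i]]) (by omega) (by simp [hlen])
            (by rw [pvGreedyBound_succ, if_neg hmatch]; omega)]
        conv_rhs => rw [bGo]
        rw [dif_pos (show i < raw.length by omega),
          dif_neg (fun h => hmatch ((bMatches_iff raw entity i hL).mp h))]
        simp
    · have hge : raw.length ≤ i + entity.length := by omega
      rw [PySem.List.pyRange_one_eq_nil (by omega), List.foldl_nil,
        bGo_tail raw entity hL (raw.length - i) i le_rfl hge (by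
          intro hc
          have hl := congrArg List.length hc
          simp only [List.length_take, List.length_drop] at hl
          have hi : i = raw.length - entity.length := by omega
          exact hD ((D_iff raw entity).mpr ⟨fun h0 => by simp [h0] at hL, by
            rw [← hi, ← hc, List.take_of_length_le (by simp; omega)], by
            rw [← hi]; omega⟩))]

-- when '<mask>' is in entity but nowhere in raw, no window ever compares equal in A,
-- so A's loop never writes and the state stays raw
lemma foldA_fixed (raw entity : List String) (he : "<mask>" ∈ entity) (hr : "<mask>" ∉ raw) :
    ∀ l : List Int, (∀ x ∈ l, 0 ≤ x ∧ x < (raw.length : Int) - (entity.length : Int)) →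
    l.foldl (fun masked k => if pyInnerA masked entity k then pyMaskA masked entity k else masked)
        raw = raw := by
  intro l
  induction l with
  | nil => intro _; rfl
  | cons x t ih =>
    intro hmem
    obtain ⟨hx0, hxb⟩ := hmem x List.mem_cons_self
    have hfalse : pyInnerA raw entity x = false := by
      obtain ⟨jn, hjn, hj⟩ := List.mem_iff_getElem.mp he
      unfold pyInnerA
      rw [List.all_eq_false]
      refine ⟨(jn : Int), ?_, ?_⟩
      · rw [PySem.List.mem_pyRange_one]
        exact ⟨by positivity, by exact_mod_cast hjn⟩
      · rw [PySem.List.pyGetD_natCast, List.getD_eq_getElem?_getD,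
          List.getElem?_eq_getElem hjn, Option.getD_some, hj,
          PySem.List.pyGetD_eq_getElem _ _ (by positivity) (by omega)]
        simp only [beq_iff_eq]
        intro hc
        exact hr (hc ▸ List.getElem_mem _)
    rw [List.foldl_cons, hfalse]
    simp only [Bool.false_eq_true, if_false]
    exact ih (fun y hy => hmem y (List.mem_cons_of_mem x hy))

-- and B never matches either, so it copies raw
lemma bGo_no_match (raw entity : List String) (hL : 0 < entity.length)
    (he : "<mask>" ∈ entity) (hr : "<mask>" ∉ raw) :
    ∀ d i, raw.length - i ≤ d → bGo raw entity hL i = raw.drop i := by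
  intro d
  induction d with
  | zero =>
    intro i hd
    rw [bGo]
    split
    · omega
    · rw [List.drop_eq_nil_of_le (by omega)]
  | succ d ih =>
    intro i hd
    by_cases hlt : i < raw.length
    · rw [bGo, dif_pos hlt, dif_neg (fun hs => by
        have hocc := (bMatches_iff raw entity i hL).mp hs
        exact hr (List.mem_of_mem_drop (List.mem_of_mem_take (hocc ▸ he)))),
        ih (i + 1) (by omega), ← List.drop_eq_getElem_cons hlt]
    · rw [bGo, dif_neg hlt, List.drop_eq_nil_of_le (by omega)]

-- A only ever writes at indices i + j with i < len(raw) - L, so the last entry stays raw's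
lemma A_keeps_last (raw entity : List String) (hL : 0 < entity.length) :
    (mask__raw_token_py raw entity).length = raw.length ∧
      (mask__raw_token_py raw entity)[raw.length - 1]? = raw[raw.length - 1]? := by
  unfold mask__raw_token_py
  have inner : ∀ (x : Int), 0 ≤ x → x < (raw.length : Int) - (entity.length : Int) →
      ∀ (l : List Int), (∀ j ∈ l, 0 ≤ j ∧ j < (entity.length : Int)) →
      ∀ s : List String, s.length = raw.length → s[raw.length - 1]? = raw[raw.length - 1]? →
      (l.foldl (fun m j => PySem.List.pySetD m (x + j) "<mask>") s).length = raw.length ∧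
        (l.foldl (fun m j => PySem.List.pySetD m (x + j) "<mask>") s)[raw.length - 1]?
          = raw[raw.length - 1]? := by
    intro x hx0 hxb l
    induction l with
    | nil => intro _ s h1 h2; exact ⟨h1, h2⟩
    | cons j t ih =>
      intro hmem s h1 h2
      obtain ⟨hj0, hjb⟩ := hmem j List.mem_cons_self
      rw [List.foldl_cons]
      have hset : PySem.List.pySetD s (x + j) "<mask>" = s.set (x + j).toNat "<mask>" :=
        PySem.List.pySetD_of_nonneg s "<mask>" (by omega)
      apply ih (fun y hy => hmem y (List.mem_cons_of_mem j hy))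
      · rw [hset, List.length_set]; exact h1
      · rw [hset, List.getElem?_set_ne (by omega), h2]
  have outer : ∀ (l : List Int), (∀ x ∈ l, 0 ≤ x ∧ x < (raw.length : Int) - (entity.length : Int)) →
      ∀ s : List String, s.length = raw.length → s[raw.length - 1]? = raw[raw.length - 1]? →
      (l.foldl (fun masked k => if pyInnerA masked entity k then pyMaskA masked entity k
          else masked) s).length = raw.length ∧
        (l.foldl (fun masked k => if pyInnerA masked entity k then pyMaskA masked entity k
          else masked) s)[raw.length - 1]? = raw[raw.length - 1]? := by
    intro l
    induction l with
    | nil => intro _ s h1 h2; exact ⟨h1, h2⟩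
    | cons x t ih =>
      intro hmem s h1 h2
      obtain ⟨hx0, hxb⟩ := hmem x List.mem_cons_self
      rw [List.foldl_cons]
      by_cases hin : pyInnerA s entity x
      · rw [if_pos hin]
        have := inner x hx0 hxb (PySem.List.pyRange 0 (entity.length : Int) 1)
          (fun j hj => by rw [PySem.List.mem_pyRange_one] at hj; exact hj) s h1 h2
        exact ih (fun y hy => hmem y (List.mem_cons_of_mem x hy)) _ this.1 this.2
      · rw [if_neg hin]
        exact ih (fun y hy => hmem y (List.mem_cons_of_mem x hy)) s h1 h2
  exact outer _ (fun x hx => by rw [PySem.List.mem_pyRange_one] at hx; exact hx) raw rfl rfl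

-- inside D_, B's scan reaches the final occurrence and ends in a block of '<mask>'
lemma bGo_last (raw entity : List String) (hL : 0 < entity.length)
    (hLn : entity.length ≤ raw.length)
    (hsuf : raw.drop (raw.length - entity.length) = entity)
    (hbd : pvGreedyBound raw entity (raw.length - entity.length) ≤ raw.length - entity.length) :
    ∀ d i, raw.length - i ≤ d → i ≤ raw.length - entity.length →
    pvGreedyBound raw entity i ≤ i →
    (bGo raw entity hL i).getLast? = some "<mask>" := by
  intro d
  induction d with
  | zero => intro i hd hle hinv; omega
  | succ d ih =>
    intro i hd hle hinv
    have hlt : i < raw.length := by omega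
    by_cases hend : i = raw.length - entity.length
    · subst hend
      have hocc : (raw.drop (raw.length - entity.length)).take entity.length = entity := by
        rw [hsuf, List.take_of_length_le le_rfl]
      rw [bGo, dif_pos hlt, dif_pos ((bMatches_iff raw entity _ hL).mpr hocc)]
      rw [bGo, dif_neg (by omega)]
      rw [show entity.length = (entity.length - 1) + 1 by omega, List.replicate_succ' (n := entity.length - 1)]
      simp
    · have hi : i < raw.length - entity.length := by omega
      by_cases hocc : (raw.drop i).take entity.length = entity
      · have hnext : i + entity.length ≤ raw.length - entity.length := by
          by_contra hcon
          have := pvGreedyBound_block raw entity i hocc hinv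
            (raw.length - entity.length - i) (by omega) (by omega)
          rw [show i + (raw.length - entity.length - i) = raw.length - entity.length by omega]
            at this
          omega
        rw [bGo, dif_pos hlt, dif_pos ((bMatches_iff raw entity i hL).mpr hocc)]
        have hne : bGo raw entity hL (i + entity.length) ≠ [] := by
          apply List.ne_nil_of_length_pos
          rw [bGo_length raw entity hL (raw.length - (i + entity.length)) _ le_rfl]
          omega
        rw [List.getLast?_append_of_ne_nil _ hne]
        exact ih (i + entity.length) (by omega) hnext
          (by rw [pvGreedyBound_block raw entity i hocc hinv entity.length (by omega) le_rfl])
      · rw [bGo, dif_pos hlt, dif_neg (fun h => hocc ((bMatches_iff raw entity i hL).mp h))]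
        have hne : bGo raw entity hL (i + 1) ≠ [] := by
          apply List.ne_nil_of_length_pos
          rw [bGo_length raw entity hL (raw.length - (i + 1)) _ le_rfl]
          omega
        rw [show raw[i] :: bGo raw entity hL (i + 1) = [raw[i]] ++ bGo raw entity hL (i + 1)
          by simp, List.getLast?_append_of_ne_nil _ hne]
        exact ih (i + 1) (by omega) (by omega)
          (by rw [pvGreedyBound_succ, if_neg hocc]; omega)

-- ===== VERDICT (by name: the statement is the Claim_ definition above) =====
theorem mask__raw_token_py_spec : Claim_unchanged_mask__raw_token_py := by
  intro raw entity _ hpre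
  unfold Spec_mask__raw_token_py
  intro hD
  unfold mask__raw_token_py mask__raw_token_py_alt
  by_cases hL : entity.length = 0
  · rw [dif_pos hL]
    have hnil : entity = [] := List.eq_nil_of_length_eq_zero hL
    subst hnil
    simp only [List.length_nil, Nat.cast_zero, sub_zero]
    have hpt : ∀ (acc : List String) (x : Int), x ∈ PySem.List.pyRange 0 (raw.length : Int) 1 →
        (if pyInnerA acc [] x then pyMaskA acc [] x else acc) = acc := by
      intro acc x _
      unfold pyInnerA pyMaskA
      rw [show ((List.length ([] : List String) : Int)) = 0 by simp,
        PySem.List.pyRange_one_eq_nil le_rfl]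
      simp
    rw [PySem.List.foldl_congr_mem _ _ (fun acc _ => acc) _ hpt, PySem.List.foldl_ignore]
  · rw [dif_neg hL]
    by_cases hment : "<mask>" ∈ entity
    · have hr : "<mask>" ∉ raw := fun hraw => hpre ⟨hment, hraw⟩
      rw [foldA_fixed raw entity hment hr _
          (fun x hx => by rw [PySem.List.mem_pyRange_one] at hx; exact hx),
        bGo_no_match raw entity _ hment hr raw.length 0 (by omega), List.drop_zero]
    · have := mainA raw entity hment (Nat.pos_of_ne_zero hL) hD raw.length 0 [] (by omega) rfl
        (by rw [pvGreedyBound_zero])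
      simpa using this

theorem mask__raw_token_py_changed : Claim_changed_mask__raw_token_py := by
  unfold Claim_changed_mask__raw_token_py
  refine ⟨by decide, by decide, by decide, by decide, ?_, by decide⟩
  show mask__raw_token_py_alt ["a", "b"] ["b"] = ["a", "<mask>"]
  rw [mask__raw_token_py_alt, dif_neg (by decide)]
  rw [bGo, dif_pos (by decide), dif_neg (by decide)]
  rw [bGo, dif_pos (by decide), dif_pos (by decide)]
  rw [bGo, dif_neg (by decide)]
  rfl

theorem mask__raw_token_py_tight : Claim_exact_mask__raw_token_py := by
  intro raw entity _ hpre hD heq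
  obtain ⟨h1, h3, h4⟩ := (D_iff raw entity).mp hD
  have h2 : entity.length ≤ raw.length := by
    have := congrArg List.length h3
    simp only [List.length_drop] at this
    omega
  have hL : 0 < entity.length := by
    cases entity with
    | nil => exact absurd rfl h1
    | cons a t => simp
  have hA := A_keeps_last raw entity hL
  have hBlast : (mask__raw_token_py_alt raw entity).getLast? = some "<mask>" := by
    rw [mask__raw_token_py_alt, dif_neg (by omega)]
    exact bGo_last raw entity _ h2 h3 h4 raw.length 0 (by omega) (by omega)
      (by rw [pvGreedyBound_zero])
  have hAlast : (mask__raw_token_py raw entity).getLast? = raw.getLast? := by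
    rw [List.getLast?_eq_getElem?, hA.1, hA.2, ← List.getLast?_eq_getElem?]
  have hrawlast : raw.getLast? = entity.getLast? := by
    conv_lhs => rw [← List.take_append_drop (raw.length - entity.length) raw, h3]
    exact List.getLast?_append_of_ne_nil _ h1
  have hmem : "<mask>" ∈ entity := by
    have : entity.getLast? = some "<mask>" := by
      rw [← hrawlast, ← hAlast, heq, hBlast]
    exact List.mem_of_getLast? this
  exact hpre ⟨hmem, List.mem_of_mem_drop (i := raw.length - entity.length) (by rw [h3]; exact hmem)⟩
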